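-- pv_equiv track=rewrite | github.com/R8yc/Kinder_Classify | kinder_classify.py | expected_prefix
-- ===== SOURCE A (Python) =====
-- def fmt_ym(y, m):
--     return f"{y:04d}", f"{m:02d}", f"{y:04d}{m:02d}"
--
-- def expected_prefix(it: dict, y: int, m: int) -> str:
--     YYYY, MM, _ = fmt_ym(y, m)
--     tpl = it["rename"].replace("{YYYY}", YYYY).replace("{MM}", MM)
--     cut = len(tpl)
--     for token in ("{orig}", "{DD}", "{ext}"):
--         i = tpl.find(token)
--         if i != -1 and i < cut: cut = i
--     return tpl[:cut]
-- ===== SOURCE B (Python) =====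
-- def fmt_ym(y, m):
--     return f"{y:04d}", f"{m:02d}", f"{y:04d}{m:02d}"
--
-- def expected_prefix(it: dict, y: int, m: int) -> str:
--     YYYY, MM, _ = fmt_ym(y, m)
--     tpl = it["rename"].replace("{YYYY}", YYYY).replace("{MM}", MM)
--     for i in range(len(tpl)):
--         if tpl.startswith(("{orig}", "{DD}", "{ext}"), i):
--             return tpl[:i]
--     return tpl
-- ===== Notes on version B (the rewrite author's own statement) =====
-- stated objective: idiomatic
-- what changed: Instead of running three separate full find() scans and keeping a manual earliest-position minimum, B makes a single left-to-right pass over the template and returns the prefix at the first position where any placeholder token starts (str.startswith with a tuple), falling back to the whole template.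
import Mathlib
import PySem

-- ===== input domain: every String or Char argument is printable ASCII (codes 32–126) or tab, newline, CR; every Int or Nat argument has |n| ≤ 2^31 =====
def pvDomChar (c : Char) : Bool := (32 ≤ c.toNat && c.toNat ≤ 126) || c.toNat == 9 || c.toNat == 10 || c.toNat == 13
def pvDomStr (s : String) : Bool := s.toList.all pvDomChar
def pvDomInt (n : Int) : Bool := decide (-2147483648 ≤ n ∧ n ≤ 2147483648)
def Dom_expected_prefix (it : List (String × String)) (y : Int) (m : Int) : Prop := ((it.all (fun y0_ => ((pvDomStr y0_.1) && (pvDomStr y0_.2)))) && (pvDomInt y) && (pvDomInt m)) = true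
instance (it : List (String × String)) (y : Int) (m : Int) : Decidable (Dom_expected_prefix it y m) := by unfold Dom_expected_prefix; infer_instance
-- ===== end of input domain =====

-- B replaces A's three separate full find() scans (with manual earliest-position minimum
-- bookkeeping) by one left-to-right pass that stops at the first position where any
-- placeholder token starts; same return value wherever A returns.

-- shared module-level helper fmt_ym: f"{n:0wd}" (zero-pad to width w, sign counted in the width)
def pyFmtD (w : Nat) (n : Int) : String :=
  if n < 0 then
    String.ofList ('-' :: (List.replicate (w - 1 - (PySem.Int.toChars (-n)).length) '0' ++ PySem.Int.toChars (-n)))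
  else
    String.ofList (List.replicate (w - (PySem.Int.toChars n).length) '0' ++ PySem.Int.toChars n)

def pyFmtYm (y m : Int) : String × String × String :=
  (pyFmtD 4 y, pyFmtD 2 m, String.ofList ((pyFmtD 4 y).toList ++ (pyFmtD 2 m).toList))

-- ===== PORT A =====
def expected_prefix (it : List (String × String)) (y : Int) (m : Int) : String :=
  let YYYY := (pyFmtYm y m).1
  let MM := (pyFmtYm y m).2.1
  let tpl := PySem.Str.replace (PySem.Str.replace (((PySem.Dict.mk it).get? "rename").getD "") "{YYYY}" YYYY) "{MM}" MM
  let cut := (["{orig}", "{DD}", "{ext}"] : List String).foldl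
    (fun cut token =>
      let i := PySem.Str.find tpl token
      if i ≠ -1 ∧ i < cut then i else cut)
    (PySem.Str.len tpl)
  PySem.Str.slice tpl none (some cut)

-- ===== PORT B =====
def pvTokens : List String := ["{orig}", "{DD}", "{ext}"]

-- the 'for i in range(len(tpl))' loop with early return: first i where any token starts
def pvScanB : List Char → Option Nat
  | [] => none
  | c :: rest =>
    if pvTokens.any (fun t => PySem.Chars.startswith (c :: rest) t.toList) then some 0
    else (pvScanB rest).map (· + 1)

-- 'return tpl[:i]' at the first hit, 'return tpl' if the loop falls through
def pvFinish (tpl : String) : Option Nat → String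
  | some i => PySem.Str.slice tpl none (some (i : Int))
  | none => tpl

def expected_prefix_alt (it : List (String × String)) (y : Int) (m : Int) : String :=
  let YYYY := (pyFmtYm y m).1
  let MM := (pyFmtYm y m).2.1
  let tpl := PySem.Str.replace (PySem.Str.replace (((PySem.Dict.mk it).get? "rename").getD "") "{YYYY}" YYYY) "{MM}" MM
  pvFinish tpl (pvScanB tpl.toList)

-- ===== PRECONDITION & SPEC =====
-- Pre_ excludes exactly the inputs where it["rename"] raises KeyError (both A and B raise there).
def Pre_expected_prefix (it : List (String × String)) (y : Int) (m : Int) : Prop :=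
  ((PySem.Dict.mk it).get? "rename").isSome = true
instance (it : List (String × String)) (y : Int) (m : Int) : Decidable (Pre_expected_prefix it y m) := by unfold Pre_expected_prefix; infer_instance

def pvWitness_expected_prefix : (List (String × String)) × Int × Int :=
  ([("rename", "{YYYY}-{MM}-{DD}_{orig}{ext}")], 2024, 5)

def Spec_expected_prefix (it : List (String × String)) (y : Int) (m : Int) (out : String) : Prop := out = expected_prefix_alt it y m
instance (it : List (String × String)) (y : Int) (m : Int) (out : String) : Decidable (Spec_expected_prefix it y m out) := by unfold Spec_expected_prefix; infer_instance

-- ===== CLAIM (what is proved, stated in full; the proofs are below) =====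
def Claim_equal_expected_prefix : Prop := ∀ (it : List (String × String)) (y : Int) (m : Int), Dom_expected_prefix it y m → Pre_expected_prefix it y m → Spec_expected_prefix it y m (expected_prefix it y m)

-- ===== LEMMAS AND PROOFS =====

-- a position j of s where some placeholder token occurs
def pvHit (s : List Char) (j : Nat) : Prop := ∃ t ∈ pvTokens, t.toList <+: s.drop j

lemma pvTokens_ne_nil : ∀ t ∈ pvTokens, t.toList ≠ [] := by decide

lemma pvScanB_none {s : List Char} (h : pvScanB s = none) : ∀ j, ¬ pvHit s j := by
  induction s with
  | nil =>
    intro j ⟨t, ht, hp⟩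
    simp only [List.drop_nil] at hp
    exact pvTokens_ne_nil t ht (List.prefix_nil.mp hp)
  | cons c rest ih =>
    intro j hj
    rw [pvScanB] at h
    split at h
    · exact absurd h (by simp)
    · rename_i hno
      cases j with
      | zero =>
        obtain ⟨t, ht, hp⟩ := hj
        simp only [Bool.not_eq_true, List.any_eq_false] at hno
        have hsw := (PySem.Chars.startswith_iff (c :: rest) t.toList).mpr hp
        simp [hno t ht] at hsw
      | succ j =>
        have hrn : pvScanB rest = none := by
          cases hrec : pvScanB rest
          · rfl
          · rw [hrec] at h; simp at h
        exact ih hrn j (by simpa [List.drop_succ_cons] using hj)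

lemma pvScanB_some {s : List Char} {i : Nat} (h : pvScanB s = some i) :
    pvHit s i ∧ (∀ j < i, ¬ pvHit s j) ∧ i ≤ s.length := by
  induction s generalizing i with
  | nil => simp [pvScanB] at h
  | cons c rest ih =>
    rw [pvScanB] at h
    split at h
    · rename_i hyes
      obtain ⟨t, ht, hp⟩ := List.any_eq_true.mp hyes
      cases h
      exact ⟨⟨t, ht, (PySem.Chars.startswith_iff _ _).mp hp⟩,
        by omega, by simp⟩
    · rename_i hno
      cases hrec : pvScanB rest with
      | none => simp [hrec] at h
      | some i' =>
        simp only [hrec, Option.map_some] at h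
        cases h
        obtain ⟨hhit, hmin, hlen⟩ := ih hrec
        refine ⟨by simpa [List.drop_succ_cons] using hhit, ?_,
          by simp only [List.length_cons]; omega⟩
        intro j hj
        cases j with
        | zero =>
          intro ⟨t, ht, hp⟩
          simp only [Bool.not_eq_true, List.any_eq_false] at hno
          have hsw := (PySem.Chars.startswith_iff (c :: rest) t.toList).mpr hp
          simp [hno t ht] at hsw
        | succ j =>
          intro hhj
          exact hmin j (by omega) (by simpa [List.drop_succ_cons] using hhj)

-- A's per-token update step
def pvStep (s : List Char) (cut : Int) (token : String) : Int :=
  if PySem.Chars.find s token.toList ≠ -1 ∧ PySem.Chars.find s token.toList < cut then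
    PySem.Chars.find s token.toList
  else cut

lemma pvStep_facts (s : List Char) (cut : Int) (token : String) :
    pvStep s cut token ≤ cut ∧
    (pvStep s cut token = cut ∨ (pvStep s cut token = PySem.Chars.find s token.toList ∧ 0 ≤ pvStep s cut token)) ∧
    (PySem.Chars.find s token.toList ≠ -1 → pvStep s cut token ≤ PySem.Chars.find s token.toList) := by
  have hge := PySem.Chars.neg_one_le_find s token.toList
  unfold pvStep
  split <;> rename_i hc
  · exact ⟨le_of_lt hc.2, Or.inr ⟨rfl, by omega⟩, fun _ => le_refl _⟩
  · refine ⟨le_refl _, Or.inl rfl, fun hne => ?_⟩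
    rw [not_and_or] at hc
    rcases hc with hc | hc
    · exact absurd hne (by simpa using hc)
    · omega

lemma pvFold_facts (s : List Char) (toks : List String) (c0 : Int) :
    (toks.foldl (pvStep s) c0 = c0 ∨
      (∃ t ∈ toks, toks.foldl (pvStep s) c0 = PySem.Chars.find s t.toList ∧ 0 ≤ toks.foldl (pvStep s) c0)) ∧
    toks.foldl (pvStep s) c0 ≤ c0 ∧
    (∀ t ∈ toks, PySem.Chars.find s t.toList ≠ -1 → toks.foldl (pvStep s) c0 ≤ PySem.Chars.find s t.toList) := by
  induction toks generalizing c0 with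
  | nil => exact ⟨Or.inl rfl, le_refl _, by simp⟩
  | cons t ts ih =>
    obtain ⟨hle, hcase, hmin⟩ := pvStep_facts s c0 t
    obtain ⟨ihcase, ihle, ihmin⟩ := ih (pvStep s c0 t)
    simp only [List.foldl_cons]
    refine ⟨?_, le_trans ihle hle, ?_⟩
    · rcases ihcase with h | ⟨t', ht', h⟩
      · rw [h]
        rcases hcase with h' | h'
        · exact Or.inl h'
        · exact Or.inr ⟨t, by simp, h'⟩
      · exact Or.inr ⟨t', by simp [ht'], h⟩
    · intro t' ht' hne
      rcases List.mem_cons.mp ht' with rfl | ht'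
      · exact le_trans ihle (hmin hne)
      · exact ihmin t' ht' hne

-- a token occurring at no dropped position occurs nowhere (find = -1)
lemma pvFind_neg_of_no_hit {s : List Char} (h : ∀ j, ¬ pvHit s j) :
    ∀ t ∈ pvTokens, PySem.Chars.find s t.toList = -1 := by
  intro t ht
  rw [PySem.Chars.find_eq_neg_one_iff]
  intro hinf
  obtain ⟨j, hj⟩ := (PySem.Chars.exists_prefix_drop_iff_isIn t.toList s).mpr
    ((PySem.Chars.isIn_iff_infix t.toList s).mpr hinf)
  exact h j ⟨t, ht, hj⟩

-- the core: A's slice-by-fold equals B's first-hit scan, for any template string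
lemma pvCore (tpl : String) :
    PySem.Str.slice tpl none (some ((["{orig}", "{DD}", "{ext}"] : List String).foldl
        (fun cut token =>
          if PySem.Str.find tpl token ≠ -1 ∧ PySem.Str.find tpl token < cut then PySem.Str.find tpl token else cut)
        (PySem.Str.len tpl)))
      = pvFinish tpl (pvScanB tpl.toList) := by
  set s := tpl.toList with hs
  have hfold : (["{orig}", "{DD}", "{ext}"] : List String).foldl
      (fun cut token =>
        if PySem.Str.find tpl token ≠ -1 ∧ PySem.Str.find tpl token < cut then PySem.Str.find tpl token else cut)
      (PySem.Str.len tpl)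
      = pvTokens.foldl (pvStep s) ((s.length : Int)) := by
    simp only [PySem.Str.find_eq, PySem.Str.len_eq, ← hs]
    rfl
  rw [hfold]
  obtain ⟨hcase, hle, hmin⟩ := pvFold_facts s pvTokens ((s.length : Int))
  cases hscan : pvScanB s with
  | none =>
    have hno := pvScanB_none hscan
    have hneg := pvFind_neg_of_no_hit hno
    have hc : pvTokens.foldl (pvStep s) ((s.length : Int)) = ((s.length : Int)) := by
      rcases hcase with h | ⟨t, ht, h, hpos⟩
      · exact h
      · rw [hneg t ht] at h; omega
    rw [hc, pvFinish]
    apply String.toList_inj.mp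
    rw [PySem.Str.toList_slice, PySem.Chars.slice_eq_listSlice, ← hs,
      PySem.List.slice_to_natCast]
    simp
  | some i =>
    obtain ⟨⟨t0, ht0, hp0⟩, himin, hilen⟩ := pvScanB_some hscan
    have hf0 : 0 ≤ PySem.Chars.find s t0.toList := by
      rw [PySem.Chars.find_nonneg_iff, ← PySem.Chars.isIn_iff_infix,
        ← PySem.Chars.exists_prefix_drop_iff_isIn]
      exact ⟨i, hp0⟩
    have hf0le : PySem.Chars.find s t0.toList ≤ (i : Int) := by
      by_contra hlt
      exact (PySem.Chars.find_spec hf0).2 i (by omega) hp0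
    have hub : pvTokens.foldl (pvStep s) ((s.length : Int)) ≤ (i : Int) :=
      le_trans (hmin t0 ht0 (by omega)) hf0le
    have hlb : (i : Int) ≤ pvTokens.foldl (pvStep s) ((s.length : Int)) := by
      rcases hcase with h | ⟨t, ht, h, hpos⟩
      · rw [h]; exact_mod_cast hilen
      · rw [h] at hpos ⊢
        by_contra hlt
        have hpre := (PySem.Chars.find_spec hpos).1
        exact himin (PySem.Chars.find s t.toList).toNat (by omega) ⟨t, ht, hpre⟩
    rw [le_antisymm hub hlb, pvFinish]

-- ===== VERDICT (by name: the statement is the Claim_ definition above) =====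
set_option maxHeartbeats 1000000 in
theorem expected_prefix_spec : Claim_equal_expected_prefix := by
  intro it y m _ _
  simp only [Spec_expected_prefix, expected_prefix, expected_prefix_alt]
  exact pvCore _
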